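-- pv_equiv track=rewrite | github.com/lh-lena/python-modules | aoc_2024/day02/d02.py | is_valid_line
-- ===== SOURCE A (Python) =====
-- MAX_DIFFERENCE = 3
--
-- def is_valid_line(sequence, max_corrections):
--     numbers = [int(num) for num in sequence]
--
--     if len(numbers) < 2:
--         return False
--
--     dir = numbers[1] - numbers[0]
--
--     for i in range(1, len(numbers)):
--         diff = numbers[i] - numbers[i-1]
--         if  (dir >= 0 and (diff <= 0 or diff > MAX_DIFFERENCE)) or \
--             (dir <= 0 and (diff >= 0 or diff < -MAX_DIFFERENCE)):
--             if (max_corrections < 1):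
--                 if dir >= diff:
--                     del numbers[i-1]
--                 else:
--                     del numbers[i]
--
--                 return is_valid_line(numbers, max_corrections+1)
--             return False
--
--     return True
-- ===== SOURCE B (Python) =====
-- MAX_DIFFERENCE = 3
--
-- def _ok_step(dir, diff):
--     if dir > 0:
--         return 0 < diff <= MAX_DIFFERENCE
--     if dir < 0:
--         return -MAX_DIFFERENCE <= diff < 0
--     return False
--
-- def is_valid_line(sequence, max_corrections):
--     numbers = [int(num) for num in sequence]
--     corrections = max_corrections
--     while True:
--         if len(numbers) < 2:
--             return False
--         dir = numbers[1] - numbers[0]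
--         bad = next((i for i, (a, b) in enumerate(zip(numbers, numbers[1:]), start=1)
--                     if not _ok_step(dir, b - a)), None)
--         if bad is None:
--             return True
--         if corrections >= 1:
--             return False
--         diff = numbers[bad] - numbers[bad - 1]
--         if dir >= diff:
--             numbers = numbers[:bad - 1] + numbers[bad:]
--         else:
--             numbers = numbers[:bad] + numbers[bad + 1:]
--         corrections += 1
-- ===== Notes on version B (the rewrite author's own statement) =====
-- stated objective: alternative
-- what changed: Replaces A's self-recursion (which re-parses and restarts on a shortened list after each correction) with an explicit while-loop over a running list and correction counter, locating the first bad adjacent pair via a positive 'ok step' predicate over zipped neighbours instead of A's indexed for-loop with a negated violation test.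
import Mathlib
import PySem

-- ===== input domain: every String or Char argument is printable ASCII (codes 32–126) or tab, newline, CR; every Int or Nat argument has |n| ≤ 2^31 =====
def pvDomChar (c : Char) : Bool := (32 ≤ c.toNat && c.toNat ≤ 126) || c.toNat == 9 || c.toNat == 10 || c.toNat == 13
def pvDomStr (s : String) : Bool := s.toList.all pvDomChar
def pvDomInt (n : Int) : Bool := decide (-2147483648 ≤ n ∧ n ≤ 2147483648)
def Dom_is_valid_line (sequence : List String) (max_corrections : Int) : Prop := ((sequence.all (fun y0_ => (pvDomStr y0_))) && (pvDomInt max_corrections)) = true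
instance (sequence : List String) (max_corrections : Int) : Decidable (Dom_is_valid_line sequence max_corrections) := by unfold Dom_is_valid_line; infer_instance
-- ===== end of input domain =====

-- B replaces A's self-recursion (re-parsing and restarting on a shortened list) by an
-- explicit correction loop over a running list, finding the first offending adjacent pair
-- with a positive "step is ok" test over zipped neighbours; objective: alternative decomposition.

-- ===== PORT A =====
-- A's violation test, literally: (dir >= 0 and (diff <= 0 or diff > 3)) or (dir <= 0 and (diff >= 0 or diff < -3))
def pvAviol (dir diff : Int) : Bool :=
  (decide (dir ≥ 0) && (decide (diff ≤ 0) || decide (diff > 3))) ||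
  (decide (dir ≤ 0) && (decide (diff ≥ 0) || decide (diff < -3)))

-- A's for-loop over range(1, len(numbers)): first index whose adjacent diff violates the rule
def pvAscan (numbers : List Int) (dir : Int) (i : Nat) : Option Nat :=
  if i < numbers.length then
    if pvAviol dir (numbers.getD i 0 - numbers.getD (i-1) 0) then some i
    else pvAscan numbers dir (i+1)
  else none
termination_by numbers.length - i

-- A's recursion on the (already-parsed) number list; fuel only makes the same recursion
-- structural (each recursive call deletes one element, so length+1 fuel never runs out)
def pvArec (fuel : Nat) (numbers : List Int) (mc : Int) : Bool :=
  match fuel with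
  | 0 => false
  | fuel+1 =>
    if numbers.length < 2 then false
    else
      let dir := numbers.getD 1 0 - numbers.getD 0 0
      match pvAscan numbers dir 1 with
      | none => true
      | some i =>
        if mc < 1 then
          let diff := numbers.getD i 0 - numbers.getD (i-1) 0
          if dir ≥ diff then pvArec fuel (numbers.eraseIdx (i-1)) (mc+1)
          else pvArec fuel (numbers.eraseIdx i) (mc+1)
        else false

def is_valid_line (sequence : List String) (max_corrections : Int) : Bool :=
  match sequence.mapM PySem.Int.ofStr? with
  | none => false   -- int(num) raises ValueError: excluded by Pre_
  | some numbers => pvArec (numbers.length + 1) numbers max_corrections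

-- ===== PORT B =====
-- B's positive step test _ok_step
def pvOkStep (dir diff : Int) : Bool :=
  if dir > 0 then decide (0 < diff ∧ diff ≤ 3)
  else if dir < 0 then decide (-3 ≤ diff ∧ diff < 0)
  else false

-- B's next(...) over enumerate(zip(numbers, numbers[1:]), start=1)
def pvBfind (dir : Int) (pairs : List (Int × Int)) (i : Nat) : Option Nat :=
  match pairs with
  | [] => none
  | (a, b) :: rest => if pvOkStep dir (b - a) then pvBfind dir rest (i+1) else some i

-- B's while-True loop over the running list and correction counter (fuel = length+1 suffices:
-- every iteration that continues shortens the list by one)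
def pvBloop (fuel : Nat) (numbers : List Int) (corr : Int) : Bool :=
  match fuel with
  | 0 => false
  | fuel+1 =>
    if numbers.length < 2 then false
    else
      let dir := numbers.getD 1 0 - numbers.getD 0 0
      match pvBfind dir (numbers.zip numbers.tail) 1 with
      | none => true
      | some i =>
        if corr ≥ 1 then false
        else
          let diff := numbers.getD i 0 - numbers.getD (i-1) 0
          let numbers' :=
            if dir ≥ diff then numbers.take (i-1) ++ numbers.drop i
            else numbers.take i ++ numbers.drop (i+1)
          pvBloop fuel numbers' (corr + 1)

def is_valid_line_alt (sequence : List String) (max_corrections : Int) : Bool :=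
  match sequence.mapM PySem.Int.ofStr? with
  | none => false   -- int(x) raises ValueError: excluded by Pre_
  | some numbers => pvBloop (numbers.length + 1) numbers max_corrections

-- ===== PRECONDITION & SPEC =====
-- Pre_ excludes exactly the inputs where int(num) raises ValueError (a string that is not an int literal)
def Pre_is_valid_line (sequence : List String) (max_corrections : Int) : Prop :=
  ∀ s ∈ sequence, (PySem.Int.ofStr? s).isSome
instance (sequence : List String) (max_corrections : Int) : Decidable (Pre_is_valid_line sequence max_corrections) := by unfold Pre_is_valid_line; infer_instance

def pvWitness_is_valid_line : List String × Int := (["1", "2", "4"], 0)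

def Spec_is_valid_line (sequence : List String) (max_corrections : Int) (out : Bool) : Prop := out = is_valid_line_alt sequence max_corrections
instance (sequence : List String) (max_corrections : Int) (out : Bool) : Decidable (Spec_is_valid_line sequence max_corrections out) := by unfold Spec_is_valid_line; infer_instance

-- ===== CLAIM (what is proved, stated in full; the proofs are below) =====
def Claim_equal_is_valid_line : Prop := ∀ (sequence : List String) (max_corrections : Int), Dom_is_valid_line sequence max_corrections → Pre_is_valid_line sequence max_corrections → Spec_is_valid_line sequence max_corrections (is_valid_line sequence max_corrections)

-- ===== LEMMAS AND PROOFS =====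

theorem pvOkStep_eq_not_viol (d x : Int) : pvOkStep d x = !pvAviol d x := by
  unfold pvOkStep pvAviol
  split_ifs with h1 h2 <;> rw [Bool.eq_iff_iff] <;> simp <;> omega

theorem pvBfind_le (dir : Int) (pairs : List (Int × Int)) (j i : Nat)
    (h : pvBfind dir pairs j = some i) : j ≤ i := by
  induction pairs generalizing j with
  | nil => simp [pvBfind] at h
  | cons p rest ih =>
    obtain ⟨a, b⟩ := p
    unfold pvBfind at h
    split_ifs at h with hok
    · exact le_trans (Nat.le_succ j) (ih _ h)
    · simp at h; omega

theorem pvAscan_eq_bfind (numbers : List Int) (dir : Int) (i : Nat) (hi : 1 ≤ i) :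
    pvAscan numbers dir i = pvBfind dir ((numbers.drop (i-1)).zip (numbers.drop i)) i := by
  by_cases h : i < numbers.length
  · have h1 : i - 1 < numbers.length := by omega
    rw [List.drop_eq_getElem_cons h1, List.drop_eq_getElem_cons h,
      show i - 1 + 1 = i from by omega]
    unfold pvAscan
    rw [if_pos h]
    simp only [List.zip_cons_cons, pvBfind, pvOkStep_eq_not_viol]
    have e1 : numbers.getD i 0 = numbers[i] := List.getD_eq_getElem _ _ h
    have e2 : numbers.getD (i-1) 0 = numbers[i-1] := List.getD_eq_getElem _ _ h1
    rw [e1, e2]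
    cases hv : pvAviol dir (numbers[i] - numbers[i-1]) with
    | true => simp
    | false =>
      simp only [Bool.not_false, if_true, Bool.false_eq_true, if_false]
      exact pvAscan_eq_bfind numbers dir (i+1) (by omega)
  · unfold pvAscan
    rw [if_neg h]
    rw [List.drop_eq_nil_of_le (le_of_not_gt h), List.zip_nil_right]
    rfl
termination_by numbers.length - i

theorem pvArec_eq_bloop (fuel : Nat) (numbers : List Int) (mc : Int) :
    pvArec fuel numbers mc = pvBloop fuel numbers mc := by
  induction fuel generalizing numbers mc with
  | zero => rfl
  | succ fuel ih =>
    unfold pvArec pvBloop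
    by_cases hlen : numbers.length < 2
    · simp [hlen]
    · rw [if_neg hlen, if_neg hlen]
      have hscan := pvAscan_eq_bfind numbers (numbers.getD 1 0 - numbers.getD 0 0) 1 le_rfl
      simp only [Nat.sub_self, List.drop_zero] at hscan
      simp only [← List.drop_one]
      simp only [hscan]
      cases hres : pvBfind (numbers.getD 1 0 - numbers.getD 0 0) (numbers.zip (List.drop 1 numbers)) 1 with
      | none => rfl
      | some i =>
        have hi : 1 ≤ i := pvBfind_le _ _ _ _ hres
        show (if mc < 1 then _ else false) = (if mc ≥ 1 then false else _)
        by_cases hmc : mc < 1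
        · rw [if_pos hmc, if_neg (by omega : ¬ mc ≥ 1)]
          split_ifs with hd
          · rw [List.eraseIdx_eq_take_drop_succ, show i - 1 + 1 = i from by omega]
            exact ih _ _
          · rw [List.eraseIdx_eq_take_drop_succ]
            exact ih _ _
        · rw [if_neg hmc, if_pos (by omega : mc ≥ 1)]

-- ===== VERDICT (by name: the statement is the Claim_ definition above) =====
theorem is_valid_line_spec : Claim_equal_is_valid_line := by
  intro sequence max_corrections _ _
  unfold Spec_is_valid_line is_valid_line is_valid_line_alt
  cases sequence.mapM PySem.Int.ofStr? with
  | none => rfl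
  | some numbers => exact pvArec_eq_bloop _ _ _
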